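-- pv_equiv track=rewrite | github.com/Arthurnevs/E8 | force_sort/force.py | force_sort
-- ===== SOURCE A (Python) =====
-- def force_sort(l):
--   aux = []
--   for j in range(len(l)):
--     aux.append(l[j])
--
--   for i in range(len(l)-1):
--     if l[i] > l[i+1]:
--       l[i+1] = l[i]
--
--   k = 0
--   nova = []
--   while True:
--     if k == len(aux):
--       break
--     v = l[k] - aux[k]
--     nova.append(v)
--     k += 1
--
--   return nova
-- ===== SOURCE B (Python) =====
-- def force_sort(l):
--     # Divide and conquer: the prefix-max array of a list is the prefix-max
--     # array of its left half, followed by the right half's prefix-max array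
--     # with every entry raised to at least the left half's maximum.
--     # Unlike A, this does NOT mutate l in place (A leaves l as its prefix-max
--     # array); the return value is identical.
--     def pmax(seg):
--         if len(seg) <= 1:
--             return list(seg)
--         mid = len(seg) // 2
--         left = pmax(seg[:mid])
--         right = pmax(seg[mid:])
--         m = left[-1]
--         return left + [x if x > m else m for x in right]
--     return [p - x for p, x in zip(pmax(l), l)]
-- ===== Notes on version B (the rewrite author's own statement) =====
-- stated objective: alternative
-- what changed: B computes the prefix-max array by divide and conquer (recursively solve the two halves, then raise the right half's entries to the left half's maximum) and zips it with the input, instead of A's three staged scans (copy to aux, in-place left-to-right running-max propagation, index while-loop of differences); B keeps no running state and does not mutate l.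
import Mathlib
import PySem

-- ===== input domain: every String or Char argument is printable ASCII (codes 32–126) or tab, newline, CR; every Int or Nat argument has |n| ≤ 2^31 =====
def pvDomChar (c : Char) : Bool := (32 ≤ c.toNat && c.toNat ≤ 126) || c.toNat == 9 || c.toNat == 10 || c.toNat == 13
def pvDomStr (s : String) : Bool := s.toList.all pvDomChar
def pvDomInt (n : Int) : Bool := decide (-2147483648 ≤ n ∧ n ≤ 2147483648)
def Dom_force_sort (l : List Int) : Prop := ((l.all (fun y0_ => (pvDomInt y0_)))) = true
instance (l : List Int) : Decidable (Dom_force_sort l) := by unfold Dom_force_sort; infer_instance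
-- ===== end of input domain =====

-- B computes the prefix-max array by divide and conquer and zips it with the input, instead
-- of A's staged in-place running-max propagation; equivalence is about the RETURN value only
-- (A additionally mutates its argument into the prefix-max array; B does not mutate it).

-- ===== PORT A =====
-- while-loop of A: walk k from 0 until k = len(aux), appending l[k] - aux[k]; fuel bounds the loop
def forceWhile (lp aux : List Int) (k : Nat) : Nat → List Int
  | 0 => []
  | fuel + 1 =>
    if k = aux.length then []
    else (lp.getD k 0 - aux.getD k 0) :: forceWhile lp aux (k + 1) fuel

def force_sort (l : List Int) : List Int :=
  -- aux = []; for j in range(len(l)): aux.append(l[j])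
  let aux := (List.range l.length).foldl (fun a j => a ++ [l.getD j 0]) []
  -- for i in range(len(l)-1): if l[i] > l[i+1]: l[i+1] = l[i]
  let lp := (List.range (l.length - 1)).foldl
    (fun cur i => if cur.getD i 0 > cur.getD (i + 1) 0 then cur.set (i + 1) (cur.getD i 0) else cur) l
  forceWhile lp aux 0 (aux.length + 1)

-- ===== PORT B =====
-- pmax(seg): prefix-max array of seg by divide and conquer; left[-1] is ported with
-- PySem.List.pyGet? (left is nonempty whenever it is read, so the .getD 0 never fires)
def pmax (seg : List Int) : List Int :=
  if seg.length ≤ 1 then seg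
  else
    let mid := seg.length / 2
    let left := pmax (seg.take mid)
    let right := pmax (seg.drop mid)
    let m := (PySem.List.pyGet? left (-1)).getD 0
    left ++ right.map (fun x => if x > m then x else m)
termination_by seg.length
decreasing_by
  · simp only [List.length_take]; omega
  · simp only [List.length_drop]; omega

def force_sort_alt (l : List Int) : List Int :=
  List.zipWith (fun p x => p - x) (pmax l) l

-- ===== PRECONDITION & SPEC =====
def Spec_force_sort (l : List Int) (out : List Int) : Prop := out = force_sort_alt l
instance (l : List Int) (out : List Int) : Decidable (Spec_force_sort l out) := by unfold Spec_force_sort; infer_instance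

-- ===== CLAIM (what is proved, stated in full; the proofs are below) =====
def Claim_equal_force_sort : Prop := ∀ (l : List Int), Dom_force_sort l → Spec_force_sort l (force_sort l)

-- ===== LEMMAS AND PROOFS =====

-- Python max of a nonempty list (0 on []); proof helper
def bMax : List Int → Int
  | [] => 0
  | x :: r => r.foldl max x

-- running-max scan: scanMax m xs lists the prefix maxima of xs seeded with m
def scanMax (m : Int) : List Int → List Int
  | [] => []
  | y :: ys => (max m y) :: scanMax (max m y) ys

def pmList : List Int → List Int
  | [] => []
  | x :: xs => x :: scanMax x xs

theorem scanMax_length (m : Int) (xs : List Int) : (scanMax m xs).length = xs.length := by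
  induction xs generalizing m with
  | nil => rfl
  | cons y ys ih => simp [scanMax, ih]

theorem pmList_length (xs : List Int) : (pmList xs).length = xs.length := by
  cases xs with
  | nil => rfl
  | cons x xs => simp [pmList, scanMax_length]

theorem scanMax_snoc (m z : Int) (ys : List Int) :
    scanMax m (ys ++ [z]) = scanMax m ys ++ [max (ys.foldl max m) z] := by
  induction ys generalizing m with
  | nil => simp [scanMax]
  | cons y ys ih => simp [scanMax, ih, List.foldl]

theorem scanMax_last (m : Int) (ys : List Int) (h : ys ≠ []) :
    (scanMax m ys).getD (ys.length - 1) 0 = ys.foldl max m := by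
  induction ys generalizing m with
  | nil => exact absurd rfl h
  | cons y ys ih =>
    cases ys with
    | nil => simp [scanMax, List.foldl]
    | cons y' ys' =>
      have hrec := ih (m := max m y) (by simp)
      simp only [List.length_cons, Nat.add_sub_cancel] at hrec ⊢
      simpa [scanMax, List.foldl] using hrec

theorem pm_last (xs : List Int) (h : xs ≠ []) :
    (pmList xs).getD (xs.length - 1) 0 = bMax xs := by
  cases xs with
  | nil => exact absurd rfl h
  | cons x r =>
    cases r with
    | nil => simp [pmList, bMax, List.foldl]
    | cons y ys =>
      have := scanMax_last x (y :: ys) (by simp)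
      simp only [List.length_cons, Nat.add_sub_cancel] at this ⊢
      simpa [pmList, bMax] using this

theorem pm_snoc (xs : List Int) (z : Int) (h : xs ≠ []) :
    pmList (xs ++ [z]) = pmList xs ++ [max (bMax xs) z] := by
  cases xs with
  | nil => exact absurd rfl h
  | cons x r =>
    simp [pmList, scanMax_snoc, bMax]

-- the copy loop builds l.take n
theorem copy_loop (l : List Int) (n : Nat) (h : n ≤ l.length) :
    (List.range n).foldl (fun a j => a ++ [l.getD j 0]) [] = l.take n := by
  induction n with
  | zero => simp
  | succ n ih =>
    rw [List.range_succ, List.foldl_append, ih (Nat.le_of_succ_le h)]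
    have hn : n < l.length := h
    rw [List.take_add_one]
    simp [List.foldl, List.getD, List.getElem?_eq_getElem hn]

-- set on the right part of an append
theorem set_append_right (as bs : List Int) (k : Nat) (v : Int) :
    (as ++ bs).set (as.length + k) v = as ++ bs.set k v := by
  induction as with
  | nil => simp
  | cons a as ih => simp [Nat.succ_add, ih]

theorem getD_append_right (as bs : List Int) (k : Nat) :
    (as ++ bs).getD (as.length + k) 0 = bs.getD k 0 := by
  simp [List.getD, List.getElem?_append_right (Nat.le_add_right _ _)]

-- the in-place propagation loop: after m steps, the first m+1 cells are prefix maxima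
theorem set_loop (l : List Int) (m : Nat) (h : m + 1 ≤ l.length) :
    (List.range m).foldl
      (fun cur i => if cur.getD i 0 > cur.getD (i + 1) 0 then cur.set (i + 1) (cur.getD i 0) else cur) l
    = pmList (l.take (m + 1)) ++ l.drop (m + 1) := by
  induction m with
  | zero =>
    cases l with
    | nil => simp at h
    | cons x xs => simp [pmList, scanMax]
  | succ m ih =>
    rw [List.range_succ, List.foldl_append, ih (Nat.le_of_succ_le h)]
    simp only [List.foldl]
    have hm1 : m + 1 < l.length := h
    have htklen : (l.take (m + 1)).length = m + 1 := by
      rw [List.length_take]; exact Nat.min_eq_left (by omega)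
    have hne : l.take (m + 1) ≠ [] := by
      intro hc; rw [hc] at htklen; simp at htklen
    have hpm : (pmList (l.take (m + 1))).length = m + 1 := by
      rw [pmList_length, htklen]
    set pmpart := pmList (l.take (m + 1)) with hpmdef
    have hread1 : (pmpart ++ l.drop (m + 1)).getD m 0 = bMax (l.take (m + 1)) := by
      have hlt : m < pmpart.length := by rw [hpm]; omega
      have : (pmpart ++ l.drop (m + 1)).getD m 0 = pmpart.getD m 0 := by
        simp [List.getD, List.getElem?_append_left hlt]
      rw [this, hpmdef]
      have := pm_last (l.take (m + 1)) hne
      rwa [htklen, Nat.add_sub_cancel] at this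
    have hread2 : (pmpart ++ l.drop (m + 1)).getD (m + 1) 0 = l.getD (m + 1) 0 := by
      have := getD_append_right pmpart (l.drop (m + 1)) 0
      rw [hpm] at this
      simpa [List.getD, List.getElem?_drop] using this
    set a := bMax (l.take (m + 1)) with ha
    set b := l.getD (m + 1) 0 with hb
    have hdrop : l.drop (m + 1) = b :: l.drop (m + 2) := by
      rw [← List.getElem_cons_drop hm1]
      simp [hb, List.getD, List.getElem?_eq_getElem hm1]
    have hset : ∀ v, (pmpart ++ l.drop (m + 1)).set (m + 1) v = pmpart ++ v :: l.drop (m + 2) := by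
      intro v
      have := set_append_right pmpart (l.drop (m + 1)) 0 v
      rw [hpm] at this
      rw [this, hdrop]
      simp
    have htake : l.take (m + 2) = l.take (m + 1) ++ [b] := by
      rw [List.take_add_one]
      simp [hb, List.getD, List.getElem?_eq_getElem hm1]
    have hpmsnoc : pmList (l.take (m + 2)) = pmpart ++ [max a b] := by
      rw [htake, pm_snoc (l.take (m + 1)) b hne, hpmdef, ha]
    by_cases hab : (pmpart ++ l.drop (m + 1)).getD m 0 > (pmpart ++ l.drop (m + 1)).getD (m + 1) 0
    · rw [if_pos hab]
      rw [hread1, hread2] at hab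
      rw [hread1, hset, hpmsnoc]
      have : max a b = a := by omega
      rw [this]
      simp
    · rw [if_neg hab]
      rw [hread1, hread2] at hab
      rw [hpmsnoc]
      have hmab : max a b = b := by omega
      rw [hmab, hdrop]
      simp

-- the while loop computes the elementwise difference
theorem while_zip (lp aux : List Int) (k fuel : Nat)
    (hlen : lp.length = aux.length) (hk0 : k ≤ aux.length) (hf : aux.length - k < fuel) :
    forceWhile lp aux k fuel = List.zipWith (fun a b => a - b) (lp.drop k) (aux.drop k) := by
  revert hk0 hf
  induction fuel generalizing k with
  | zero => intro hk0 hf; omega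
  | succ fuel ih =>
    intro hk0 hf
    simp only [forceWhile]
    by_cases hk : k = aux.length
    · rw [if_pos hk]
      subst hk
      simp
    · rw [if_neg hk]
      have hk' : k < aux.length := by omega
      have hkl : k < lp.length := by omega
      rw [ih (k + 1) (by omega) (by omega)]
      have h1 : lp.drop k = lp.getD k 0 :: lp.drop (k + 1) := by
        rw [← List.getElem_cons_drop hkl]
        simp [List.getD, List.getElem?_eq_getElem hkl]
      have h2 : aux.drop k = aux.getD k 0 :: aux.drop (k + 1) := by
        rw [← List.getElem_cons_drop hk']
        simp [List.getD, List.getElem?_eq_getElem hk']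
      rw [h1, h2]
      rfl

-- pmList over an append: the right part is raised to the left part's maximum
theorem scanMax_append (m : Int) (as bs : List Int) :
    scanMax m (as ++ bs) = scanMax m as ++ scanMax (as.foldl max m) bs := by
  induction as generalizing m with
  | nil => simp [scanMax]
  | cons a as ih => simp [scanMax, ih, List.foldl]

theorem scanMax_maxmap (m c : Int) (ys : List Int) :
    scanMax (max m c) ys = (scanMax c ys).map (fun x => max m x) := by
  induction ys generalizing c with
  | nil => simp [scanMax]
  | cons y t ih => simp [scanMax, max_assoc, ih]

theorem scanMax_eq_map_pm (M : Int) (ys : List Int) :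
    scanMax M ys = (pmList ys).map (fun x => max M x) := by
  cases ys with
  | nil => rfl
  | cons y t => simp [scanMax, pmList, scanMax_maxmap]

theorem pmList_append (xs ys : List Int) (h : xs ≠ []) :
    pmList (xs ++ ys) = pmList xs ++ (pmList ys).map (fun x => max (bMax xs) x) := by
  cases xs with
  | nil => exact absurd rfl h
  | cons x r =>
    rw [List.cons_append,
      show pmList (x :: (r ++ ys)) = x :: scanMax x (r ++ ys) from rfl,
      scanMax_append, scanMax_eq_map_pm (List.foldl max x r) ys]
    simp [pmList, bMax]

-- left[-1] of the prefix-max array is the maximum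
theorem pm_neg_one (xs : List Int) (h : xs ≠ []) :
    (PySem.List.pyGet? (pmList xs) (-1)).getD 0 = bMax xs := by
  have hlen : (pmList xs).length = xs.length := pmList_length xs
  have hpos : 0 < xs.length := List.length_pos_iff.mpr h
  simp only [PySem.List.pyGet?, PySem.List.pyIdx?, hlen]
  rw [if_neg (by omega), if_pos (by omega)]
  simpa [List.getD] using pm_last xs h

-- the divide-and-conquer pmax computes the prefix-max list
theorem pmax_eq (seg : List Int) : pmax seg = pmList seg := by
  induction seg using pmax.induct with
  | case1 seg h =>
    rw [pmax, if_pos h]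
    match seg, h with
    | [], _ => rfl
    | [x], _ => rfl
  | case2 seg h mid ihl ihr =>
    have hm2 : mid = seg.length / 2 := rfl
    rw [hm2] at ihl ihr
    rw [pmax]
    simp only [if_neg h]
    rw [ihl, ihr]
    have hlen2 : 2 ≤ seg.length := by omega
    have htne : seg.take (seg.length / 2) ≠ [] := by
      intro hc
      have := congrArg List.length hc
      simp only [List.length_take, List.length_nil] at this
      omega
    rw [pm_neg_one _ htne]
    have hfun : (fun x => if x > bMax (seg.take (seg.length / 2)) then x
                  else bMax (seg.take (seg.length / 2)))
        = (fun x => max (bMax (seg.take (seg.length / 2))) x) := by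
      funext x
      by_cases hx : x > bMax (seg.take (seg.length / 2)) <;> simp [hx] <;> omega
    rw [hfun, ← pmList_append _ _ htne, List.take_append_drop]

-- B equals the zipWith of prefix maxima with the original list
theorem alt_eq_zip (l : List Int) :
    force_sort_alt l = List.zipWith (fun a b => a - b) (pmList l) l := by
  unfold force_sort_alt
  rw [pmax_eq]

-- ===== VERDICT (by name: the statement is the Claim_ definition above) =====
theorem force_sort_spec : Claim_equal_force_sort := by
  intro l _
  unfold Spec_force_sort
  unfold force_sort
  rw [copy_loop l l.length (le_refl _), List.take_length]
  have hlp : (List.range (l.length - 1)).foldl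
      (fun cur i => if cur.getD i 0 > cur.getD (i + 1) 0 then cur.set (i + 1) (cur.getD i 0) else cur) l
      = pmList l := by
    cases l with
    | nil => rfl
    | cons x xs =>
      have h := set_loop (x :: xs) xs.length (by simp)
      simp only [List.length_cons, Nat.add_sub_cancel]
      rw [h]
      simp
  rw [hlp, alt_eq_zip]
  rw [while_zip (pmList l) l 0 (l.length + 1) (by rw [pmList_length]) (by omega) (by omega)]
  simp
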